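-- pv_equiv track=rewrite | github.com/adam-holder/Projects | ProjectEuler/Problem 15 The Sequel.py | countZerosOnes
-- ===== SOURCE A (Python) =====
-- def countZerosOnes(path):
--     zeros = 0
--     ones = 0
--     for digit in path:
--         if digit == '0':
--             zeros += 1
--         else:
--             ones += 1
--     if zeros == ones:
--         return True
--     else:
--         return False
-- ===== SOURCE B (Python) =====
-- def countZerosOnes(path):
--     # Cancellation stack: a zero cancels a pending one and vice versa,
--     # like matching parentheses; counts are equal iff the stack ends empty.
--     stack = []
--     for digit in path:
--         z = (digit == '0')
--         if stack and stack[-1] != z: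
--             stack.pop()
--         else:
--             stack.append(z)
--     return not stack
-- ===== Notes on version B (the rewrite author's own statement) =====
-- stated objective: alternative
-- what changed: Replaced the two-counter tally-and-compare by a parenthesis-matching cancellation stack: each character cancels an opposite pending character or is pushed, and the path is balanced iff the stack ends empty; correct because the stack stays homogeneous, so its signed height tracks zeros-minus-ones.
import Mathlib
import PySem

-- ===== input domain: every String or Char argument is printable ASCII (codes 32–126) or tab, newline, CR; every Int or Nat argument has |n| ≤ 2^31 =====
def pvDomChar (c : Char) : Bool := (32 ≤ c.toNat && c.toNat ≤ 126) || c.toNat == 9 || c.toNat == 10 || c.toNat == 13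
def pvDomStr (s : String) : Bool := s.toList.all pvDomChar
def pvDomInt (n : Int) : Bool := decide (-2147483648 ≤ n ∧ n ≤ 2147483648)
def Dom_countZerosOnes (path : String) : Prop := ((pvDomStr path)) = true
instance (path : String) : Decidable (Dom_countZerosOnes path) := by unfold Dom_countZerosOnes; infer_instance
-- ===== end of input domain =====

-- B replaces A's two-counter tally by a parenthesis-matching cancellation stack (same cost, different data structure).

-- ===== PORT A =====
def countZerosOnes (path : String) : Bool :=
  let zo := path.toList.foldl
    (fun (acc : Int × Int) digit =>
      if digit = '0' then (acc.1 + 1, acc.2) else (acc.1, acc.2 + 1))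
    (0, 0)
  if zo.1 = zo.2 then true else false

-- ===== PORT B =====
-- one step of B's loop body: cancel against the stack top or push (top of stack = list head)
def pvStepB (stack : List Bool) (digit : Char) : List Bool :=
  let z := digit == '0'
  match stack with
  | t :: rest => if t != z then rest else z :: t :: rest
  | [] => [z]

def countZerosOnes_alt (path : String) : Bool :=
  let stack := path.toList.foldl pvStepB []
  stack.isEmpty

-- ===== PRECONDITION & SPEC =====
def Spec_countZerosOnes (path : String) (out : Bool) : Prop := out = countZerosOnes_alt path
instance (path : String) (out : Bool) : Decidable (Spec_countZerosOnes path out) := by unfold Spec_countZerosOnes; infer_instance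

-- ===== CLAIM =====
def Claim_equal_countZerosOnes : Prop := ∀ (path : String), Dom_countZerosOnes path → Spec_countZerosOnes path (countZerosOnes path)

-- ===== LEMMAS AND PROOFS =====
-- signed height of a homogeneous stack of m copies of b
def pvVal (m : Nat) (b : Bool) : Int := if b then (m : Int) else -(m : Int)

-- Invariant: from a homogeneous stack, B's fold yields a homogeneous stack whose
-- signed height has moved by (zeros - ones) of the consumed suffix.
theorem pv_stack_key (l : List Char) : ∀ (n : Nat) (b : Bool),
    ∃ m b', l.foldl pvStepB (List.replicate n b) = List.replicate m b' ∧
      pvVal m b' = pvVal n b + (2 * (l.count '0' : Int) - l.length) := by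
  induction l with
  | nil => intro n b; exact ⟨n, b, by simp⟩
  | cons c t ih =>
    intro n b
    have hδ : (2 * ((c :: t).count '0' : Int) - (c :: t).length)
        = (2 * (t.count '0' : Int) - t.length) + (if c = '0' then 1 else -1) := by
      by_cases hc : c = '0' <;> simp [hc] <;> push_cast <;> ring
    cases n with
    | zero =>
      obtain ⟨m, b', hfold, hval⟩ := ih 1 (c == '0')
      refine ⟨m, b', ?_, ?_⟩
      · rw [List.foldl_cons]
        have hstep : pvStepB (List.replicate 0 b) c = List.replicate 1 (c == '0') := by
          simp [pvStepB]
        rw [hstep]; exact hfold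
      · rw [hval, hδ]
        by_cases hc : c = '0' <;> simp [pvVal, hc] <;> ring
    | succ k =>
      by_cases hb : b = (c == '0')
      · -- same as top: push
        obtain ⟨m, b', hfold, hval⟩ := ih (k + 2) b
        refine ⟨m, b', ?_, ?_⟩
        · rw [List.foldl_cons]
          have hstep : pvStepB (List.replicate (k + 1) b) c = List.replicate (k + 2) b := by
            simp [pvStepB, List.replicate_succ, ← hb]
          rw [hstep]; exact hfold
        · rw [hval, hδ]
          by_cases hcc : c = '0' <;> cases hbv : b <;>
            rw [hbv] at hb <;> simp [hcc] at hb <;>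
            simp [pvVal, hbv, hcc] <;> push_cast <;> ring
      · -- opposite of top: pop
        obtain ⟨m, b', hfold, hval⟩ := ih k b
        refine ⟨m, b', ?_, ?_⟩
        · rw [List.foldl_cons]
          have hstep : pvStepB (List.replicate (k + 1) b) c = List.replicate k b := by
            simp only [List.replicate_succ, pvStepB]
            rw [if_pos]
            simpa using hb
          rw [hstep]; exact hfold
        · rw [hval, hδ]
          by_cases hcc : c = '0' <;> cases hbv : b <;>
            rw [hbv] at hb <;> simp [hcc] at hb <;>
            simp [pvVal, hbv, hcc] <;> push_cast <;> ring

theorem pv_fold_counts (l : List Char) (z o : Int) :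
    l.foldl (fun (acc : Int × Int) digit =>
      if digit = '0' then (acc.1 + 1, acc.2) else (acc.1, acc.2 + 1)) (z, o)
    = (z + (l.count '0' : Int), o + ((l.length - l.count '0' : Nat) : Int)) := by
  induction l generalizing z o with
  | nil => simp
  | cons c t ih =>
    have hc := List.count_le_length (l := t) (a := '0')
    by_cases h : c = '0' <;> simp [h, ih] <;> omega

-- ===== VERDICT =====
theorem countZerosOnes_spec : Claim_equal_countZerosOnes := by
  intro path _
  unfold Spec_countZerosOnes countZerosOnes countZerosOnes_alt
  obtain ⟨m, b', hfold, hval⟩ := pv_stack_key path.toList 0 true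
  have h0 : (List.replicate 0 true : List Bool) = [] := rfl
  rw [h0] at hfold
  simp only [hfold, pv_fold_counts, zero_add]
  have hc := List.count_le_length (l := path.toList) (a := '0')
  have hval0 : pvVal 0 true = 0 := rfl
  rw [hval0, zero_add] at hval
  have hmz : (m = 0) ↔ (2 * (path.toList.count '0' : Int) - path.toList.length = 0) := by
    rw [← hval]; cases b' <;> simp [pvVal] <;> omega
  split_ifs with h
  · rw [Nat.cast_sub hc] at h
    have : m = 0 := hmz.mpr (by omega)
    simp [this]
  · rw [Nat.cast_sub hc] at h
    have : ¬ m = 0 := fun hm => h (by have := hmz.mp hm; omega)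
    simp [List.isEmpty_iff, this]
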